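-- pv_equiv track=rewrite | github.com/ZhuoZhuoCrayon/my-Nodes | Python/常见类库使用/use_fnmatch/expression_machine.py | range2re
-- ===== SOURCE A (Python) =====
-- from typing import List, Tuple
--
-- def get_upper_range(begin: int) -> Tuple[int, int]:
--     end_str = str(begin)
--     for index in range(len(end_str) - 1, -1, -1):
--         if end_str[index] == "0":
--             end_str = "9".join([end_str[:index], end_str[index + 1:]])
--         else:
--             end_str = "9".join([end_str[:index], end_str[index + 1:]])
--             break
--     return begin, int(end_str)
--
-- def get_lower_range(end: int) -> Tuple[int, int]:
--     begin_str = str(end)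
--     for index in range(len(begin_str) - 1, -1, -1):
--         if begin_str[index] == "9":
--             begin_str = "0".join([begin_str[:index], begin_str[index + 1:]])
--         else:
--             begin_str = "0".join([begin_str[:index], begin_str[index + 1:]])
--             break
--     return int(begin_str), end
--
-- def split_range_left(begin: int, end: int) -> List[Tuple[int, int]]:
--     split_range_list = []
--     while begin < end:
--         range_part = get_upper_range(begin)
--         split_range_list.append(range_part)
--         # 从切割右界下一个数开始继续切割
--         begin = range_part[1] + 1
--     return split_range_list
--
-- def split_range_right(begin: int, end: int) -> List[Tuple[int, int]]:
--     split_range_list = []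
--     while begin < end:
--         range_part = get_lower_range(end)
--         split_range_list.append(range_part)
--         end = range_part[0] - 1
--     split_range_list.reverse()
--     return split_range_list
--
-- def range2re(begin: int, end: int) -> List[str]:
--     if begin == end:
--         return [str(begin)]
--     split_by_left = split_range_left(begin, end)
--     mid_left = split_by_left.pop()
--     split_by_right = split_range_right(mid_left[0], end)
--     mid_right = split_by_right.pop(0)
--
--     split_ranges = []
--     split_ranges.extend(split_by_left)
--
--     # 有交集，对于左切，start是准确的，对于右切，end是准确的，取left.start - left.end
--     if mid_right[0] < mid_left[1] and mid_left[0] < mid_right[1]: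
--         split_ranges.append((mid_left[0], mid_right[1]))
--     else:
--         split_ranges.extend([mid_left, mid_right])
--     split_ranges.extend(split_by_right)
--
--     re_str_list = []
--     for split_range in split_ranges:
--         begin_str = str(split_range[0])
--         end_str = str(split_range[1])
--         split_range_re = ""
--         for index in range(len(begin_str)):
--             if begin_str[index] == end_str[index]:
--                 split_range_re += begin_str[index]
--             else:
--                 split_range_re += f"[{begin_str[index]}-{end_str[index]}]"
--         re_str_list.append(split_range_re)
--     return re_str_list
-- ===== SOURCE B (Python) =====
-- from typing import List
--
--
-- def _nine_fill(n: int) -> int: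
--     # smallest value >= n obtained by setting the trailing zero digits of n,
--     # plus one more digit, to 9 (closed form via rstrip instead of an index loop)
--     s = str(n)
--     t = s.rstrip("0")
--     return int("9" * len(s) if not t else t[:-1] + "9" * (len(s) - len(t) + 1))
--
--
-- def _zero_fill(n: int) -> int:
--     # value <= n obtained by setting the trailing nine digits of n,
--     # plus one more digit, to 0
--     s = str(n)
--     t = s.rstrip("9")
--     return int("0" * len(s) if not t else t[:-1] + "0" * (len(s) - len(t) + 1))
--
--
-- def _render(lo: int, hi: int) -> str:
--     bs, es = str(lo), str(hi)
--     out = ""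
--     for i in range(len(bs)):
--         out += bs[i] if bs[i] == es[i] else f"[{bs[i]}-{es[i]}]"
--     return out
--
--
-- def _right(b: int, e: int, u: int) -> List[str]:
--     # descend from e by zero-fills until the lowest block touches b,
--     # then merge it with the pending left block (b, u) when they overlap
--     l = _zero_fill(e)
--     if l - 1 > b:
--         return _right(b, l - 1, u) + [_render(l, e)]
--     if l < u:
--         return [_render(b, e)]
--     return [_render(b, u), _render(l, e)]
--
--
-- def _split(b: int, e: int) -> List[str]:
--     # ascend from b by nine-fills while the next block still starts below e
--     u = _nine_fill(b)
--     if u + 1 < e: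
--         return [_render(b, u)] + _split(u + 1, e)
--     return _right(b, e, u)
--
--
-- def range2re(begin: int, end: int) -> List[str]:
--     if begin == end:
--         return [str(begin)]
--     return _split(begin, end)
-- ===== Notes on version B (the rewrite author's own statement) =====
-- stated objective: alternative
-- what changed: B replaces A's two greedy while-loop passes plus list pop/reverse/overlap-merge bookkeeping by a single recursive descent (nine-fill ascent from begin, then zero-fill descent from end with the merge decided locally), and computes the digit fills by a closed rstrip-based string form instead of A's per-digit index loop with repeated slicing and joining.
import Mathlib
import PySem

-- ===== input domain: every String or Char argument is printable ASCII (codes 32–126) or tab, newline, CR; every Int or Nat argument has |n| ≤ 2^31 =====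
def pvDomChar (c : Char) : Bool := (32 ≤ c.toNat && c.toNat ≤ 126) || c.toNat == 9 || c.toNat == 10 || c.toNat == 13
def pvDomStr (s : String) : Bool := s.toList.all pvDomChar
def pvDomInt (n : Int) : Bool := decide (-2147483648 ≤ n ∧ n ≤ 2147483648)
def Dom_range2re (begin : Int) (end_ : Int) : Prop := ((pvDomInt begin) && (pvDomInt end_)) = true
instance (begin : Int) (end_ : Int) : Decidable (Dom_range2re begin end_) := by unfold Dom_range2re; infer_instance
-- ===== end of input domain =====

-- B replaces A's two greedy split passes + pop/reverse/overlap-merge bookkeeping by one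
-- recursive descent (nine-fill ascent, then zero-fill descent), and A's per-digit index
-- loops in the fill helpers by a closed rstrip-based form (objective: alternative).

-- int(s): shared shim for both ports; every call site passes a nonempty digit string,
-- on which Python's int() returns normally, so the `getD 0` default is unreachable.
def pvIntOf (s : List Char) : Int := (PySem.Int.ofChars? s).getD 0

-- ===== PORT A =====
-- the index loop of get_upper_range / get_lower_range (identical code up to the
-- continue-char and fill-char constants); "9".join([s[:i], s[i+1:]]) = s[:i] + "9" + s[i+1:]
def pvFillLoop (contc fillc : Char) : List Char → List Int → List Char
  | s, [] => s
  | s, i :: rest =>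
    let s' := PySem.List.slice s none (some i) ++ fillc :: PySem.List.slice s (some (i + 1)) none
    if PySem.List.pyGetD s i ' ' == contc then pvFillLoop contc fillc s' rest else s'

def pvGetUpperRange (begin : Int) : Int × Int :=
  let s := PySem.Int.toChars begin
  (begin, pvIntOf (pvFillLoop '0' '9' s (PySem.List.pyRange (PySem.List.len s - 1) (-1) (-1))))

def pvGetLowerRange (end_ : Int) : Int × Int :=
  let s := PySem.Int.toChars end_
  (pvIntOf (pvFillLoop '9' '0' s (PySem.List.pyRange (PySem.List.len s - 1) (-1) (-1))), end_)

-- while begin < end: … — fuel (end-begin) bounds the iteration count (each step raises begin)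
def pvSplitLeftAux : Nat → Int → Int → List (Int × Int) → List (Int × Int)
  | 0, _, _, acc => acc
  | fuel + 1, b, e, acc =>
    if b < e then pvSplitLeftAux fuel ((pvGetUpperRange b).2 + 1) e (acc ++ [pvGetUpperRange b])
    else acc

def pvSplitRangeLeft (begin : Int) (end_ : Int) : List (Int × Int) :=
  pvSplitLeftAux (end_ - begin).toNat begin end_ []

def pvSplitRightAux : Nat → Int → Int → List (Int × Int) → List (Int × Int)
  | 0, _, _, acc => acc
  | fuel + 1, b, e, acc =>
    if b < e then pvSplitRightAux fuel b ((pvGetLowerRange e).1 - 1) (acc ++ [pvGetLowerRange e])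
    else acc

def pvSplitRangeRight (begin : Int) (end_ : Int) : List (Int × Int) :=
  (pvSplitRightAux (end_ - begin).toNat begin end_ []).reverse

-- the per-digit rendering loop of A's final for; es[i] is in range on every input
-- admitted by Pre_ (both bounds of each emitted subrange have equally many digits)
def pvRenderA (p : Int × Int) : String :=
  let bs := PySem.Int.toChars p.1
  let es := PySem.Int.toChars p.2
  String.ofList ((PySem.List.pyRange 0 (PySem.List.len bs) 1).foldl (fun acc i =>
    if PySem.List.pyGetD bs i ' ' == PySem.List.pyGetD es i ' '
    then acc ++ [PySem.List.pyGetD bs i ' ']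
    else acc ++ ['[', PySem.List.pyGetD bs i ' ', '-', PySem.List.pyGetD es i ' ', ']']) [])

def range2re (begin : Int) (end_ : Int) : List String :=
  if begin == end_ then [PySem.Int.toStr begin] else
  match PySem.List.pop? (pvSplitRangeLeft begin end_) (-1) with
  | none => []          -- Python raises IndexError ('pop from empty list'); outside Pre_
  | some (mid_left, split_by_left) =>
    match PySem.List.pop? (pvSplitRangeRight mid_left.1 end_) 0 with
    | none => []        -- unreachable: the right pass yields at least one pair under Pre_
    | some (mid_right, split_by_right) =>
      ((split_by_left ++
        (if mid_right.1 < mid_left.2 ∧ mid_left.1 < mid_right.2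
         then [(mid_left.1, mid_right.2)]
         else [mid_left, mid_right])) ++
       split_by_right).foldl (fun acc r => acc ++ [pvRenderA r]) []

-- ===== PORT B =====
-- hand port of Python's s.rstrip(c) for a single strip char (PySem.Chars has no
-- chars-argument rstrip); exact: removes the maximal trailing run of c
def pvRstrip (c : Char) (s : List Char) : List Char := (s.reverse.dropWhile (· == c)).reverse

def pvNineFill (n : Int) : Int :=
  let s := PySem.Int.toChars n
  let t := pvRstrip '0' s
  pvIntOf (if t = [] then List.replicate s.length '9'
           else t.dropLast ++ List.replicate (s.length - t.length + 1) '9')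

def pvZeroFill (n : Int) : Int :=
  let s := PySem.Int.toChars n
  let t := pvRstrip '9' s
  pvIntOf (if t = [] then List.replicate s.length '0'
           else t.dropLast ++ List.replicate (s.length - t.length + 1) '0')

def pvRenderB (lo hi : Int) : String :=
  let bs := PySem.Int.toChars lo
  let es := PySem.Int.toChars hi
  String.ofList ((PySem.List.pyRange 0 (PySem.List.len bs) 1).foldl (fun acc i =>
    if PySem.List.pyGetD bs i ' ' == PySem.List.pyGetD es i ' '
    then acc ++ [PySem.List.pyGetD bs i ' ']
    else acc ++ ['[', PySem.List.pyGetD bs i ' ', '-', PySem.List.pyGetD es i ' ', ']']) [])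

-- _right: descend from e by zero-fills; fuel bounds the depth (each step lowers e)
def pvRightAux : Nat → Int → Int → Int → List String
  | 0, _, _, _ => []
  | fuel + 1, b, e, u =>
    let l := pvZeroFill e
    if l - 1 > b then pvRightAux fuel b (l - 1) u ++ [pvRenderB l e]
    else if l < u then [pvRenderB b e]
    else [pvRenderB b u, pvRenderB l e]

-- _split: ascend from b by nine-fills while the next block starts below e
def pvSplitAux : Nat → Int → Int → List String
  | 0, _, _ => []
  | fuel + 1, b, e =>
    let u := pvNineFill b
    if u + 1 < e then pvRenderB b u :: pvSplitAux fuel (u + 1) e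
    else pvRightAux (fuel + 1) b e u

def range2re_alt (begin : Int) (end_ : Int) : List String :=
  if begin == end_ then [PySem.Int.toStr begin]
  else pvSplitAux ((end_ - begin).toNat + 1) begin end_

-- ===== PRECONDITION & SPEC =====
-- Pre_ excludes begin > end_ (A pops from an empty list: IndexError) and
-- begin < end_ with begin < 0 (A's digit surgery on the '-…' string loops forever).
def Pre_range2re (begin : Int) (end_ : Int) : Prop :=
  begin = end_ ∨ (0 ≤ begin ∧ begin < end_)
instance (begin : Int) (end_ : Int) : Decidable (Pre_range2re begin end_) := by
  unfold Pre_range2re; infer_instance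

def pvWitness_range2re : Int × Int := (12, 3456)

def Spec_range2re (begin : Int) (end_ : Int) (out : List String) : Prop := out = range2re_alt begin end_
instance (begin : Int) (end_ : Int) (out : List String) : Decidable (Spec_range2re begin end_ out) := by
  unfold Spec_range2re; infer_instance

-- ===== CLAIM (what is proved, stated in full; the proofs are below) =====
def Claim_equal_range2re : Prop := ∀ (begin : Int) (end_ : Int), Dom_range2re begin end_ → Pre_range2re begin end_ → Spec_range2re begin end_ (range2re begin end_)

-- ===== LEMMAS AND PROOFS =====

-- ---- capture of the (private) digit-accumulator of PySem.Int.ofChars? ----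
theorem pvCapture : ∃ g : List Char → Bool → Nat → Option Nat,
    (∀ cs : List Char,
      PySem.Int.ofChars? cs =
        (match (List.dropWhile PySem.Int.isIntSpace (List.dropWhile PySem.Int.isIntSpace cs).reverse).reverse with
         | '-' :: ds => Option.map (fun n => -n) (do let a ← (match ds with | [] => none | cs' => g cs' false 0); pure (a : Int))
         | '+' :: ds => Option.map (fun n => n) (do let a ← (match ds with | [] => none | cs' => g cs' false 0); pure (a : Int))
         | ds => Option.map (fun n => n) (do let a ← (match ds with | [] => none | cs' => g cs' false 0); pure (a : Int)))) ∧
    (∀ b a, g [] b a = if b then some a else none) ∧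
    (∀ c cs b a, g (c :: cs) b a =
      if c.isDigit then g cs true (a * 10 + (c.toNat - '0'.toNat))
      else if c = '_' ∧ b = true then
        (match cs with
         | d :: _ => if d.isDigit then g cs false a else none
         | [] => none)
      else none) :=
  ⟨_, fun _ => rfl, fun _ _ => rfl, fun _ _ _ _ => rfl⟩

noncomputable def pvG : List Char → Bool → Nat → Option Nat := pvCapture.choose

theorem pvG_ofChars (cs : List Char) :
    PySem.Int.ofChars? cs =
      (match (List.dropWhile PySem.Int.isIntSpace (List.dropWhile PySem.Int.isIntSpace cs).reverse).reverse with
       | '-' :: ds => Option.map (fun n => -n) (do let a ← (match ds with | [] => none | cs' => pvG cs' false 0); pure (a : Int))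
       | '+' :: ds => Option.map (fun n => n) (do let a ← (match ds with | [] => none | cs' => pvG cs' false 0); pure (a : Int))
       | ds => Option.map (fun n => n) (do let a ← (match ds with | [] => none | cs' => pvG cs' false 0); pure (a : Int))) :=
  pvCapture.choose_spec.1 cs

theorem pvG_cons (c : Char) (cs : List Char) (b : Bool) (a : Nat) :
    pvG (c :: cs) b a =
      if c.isDigit then pvG cs true (a * 10 + (c.toNat - '0'.toNat))
      else if c = '_' ∧ b = true then
        (match cs with
         | d :: _ => if d.isDigit then pvG cs false a else none
         | [] => none)
      else none :=
  pvCapture.choose_spec.2.2 c cs b a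

theorem pvG_nil (b : Bool) (a : Nat) : pvG [] b a = if b then some a else none :=
  pvCapture.choose_spec.2.1 b a

def pvStep (n : Nat) (c : Char) : Nat := n * 10 + (c.toNat - '0'.toNat)

theorem pvG_digits (ds : List Char) (h : ∀ c ∈ ds, c.isDigit) (a : Nat) :
    pvG ds true a = some (ds.foldl pvStep a) := by
  induction ds generalizing a with
  | nil => simp [pvG_nil]
  | cons c cs ih =>
    rw [pvG_cons, if_pos (h c (by simp))]
    simpa [pvStep] using ih (fun d hd => h d (by simp [hd])) _

theorem pv_isIntSpace_digit (c : Char) (h : c.isDigit) : PySem.Int.isIntSpace c = false := by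
  simp only [PySem.Int.isIntSpace, Bool.or_eq_false_iff, decide_eq_false_iff_not]
  refine ⟨⟨⟨⟨⟨?_, ?_⟩, ?_⟩, ?_⟩, ?_⟩, ?_⟩ <;> rintro rfl <;> exact absurd h (by decide)

theorem pv_dropWhile_space_digits (l : List Char) (h : ∀ c ∈ l, c.isDigit) :
    List.dropWhile PySem.Int.isIntSpace l = l := by
  cases l with
  | nil => rfl
  | cons c cs =>
    rw [List.dropWhile_cons_of_neg]
    simp [pv_isIntSpace_digit c (h c (by simp))]

theorem pv_ofChars_digits (ds : List Char) (hne : ds ≠ []) (h : ∀ c ∈ ds, c.isDigit) :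
    PySem.Int.ofChars? ds = some ((ds.foldl pvStep 0 : Nat) : Int) := by
  rw [pvG_ofChars]
  rw [pv_dropWhile_space_digits ds h,
      pv_dropWhile_space_digits ds.reverse (by simpa using h), List.reverse_reverse]
  obtain ⟨c, cs, rfl⟩ : ∃ c cs, ds = c :: cs := by
    cases ds with | nil => exact absurd rfl hne | cons c cs => exact ⟨c, cs, rfl⟩
  have hc : c.isDigit := h c (by simp)
  have hcm : c ≠ '-' := by rintro rfl; exact absurd hc (by decide)
  have hcp : c ≠ '+' := by rintro rfl; exact absurd hc (by decide)
  have hg : pvG (c :: cs) false 0 = some ((c :: cs).foldl pvStep 0) := by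
    rw [pvG_cons, if_pos hc]
    simpa [pvStep] using pvG_digits cs (fun d hd => h d (by simp [hd])) _
  split
  · rename_i ds' heq; exact absurd (by injection heq) hcm
  · rename_i ds' heq; exact absurd (by injection heq) hcp
  · simp [hg]

theorem pv_intOf_digits (ds : List Char) (hne : ds ≠ []) (h : ∀ c ∈ ds, c.isDigit) :
    pvIntOf ds = ((ds.foldl pvStep 0 : Nat) : Int) := by
  simp [pvIntOf, pv_ofChars_digits ds hne h]

-- ---- decimal digit strings of Nat.toDigits ----
def pvDigs (n : Nat) : List Char :=
  if _h : n < 10 then [Nat.digitChar n]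
  else pvDigs (n / 10) ++ [Nat.digitChar (n % 10)]
  decreasing_by exact Nat.div_lt_self (by omega) (by omega)

theorem pv_digitChar_isDigit (k : Nat) (h : k < 10) : (Nat.digitChar k).isDigit := by
  interval_cases k <;> decide

theorem pv_digitChar_val (k : Nat) (h : k < 10) : (Nat.digitChar k).toNat - 48 = k := by
  interval_cases k <;> decide

theorem pvDigs_digits (n : Nat) : ∀ c ∈ pvDigs n, c.isDigit := by
  induction n using Nat.strong_induction_on with
  | _ n ih =>
    rw [pvDigs]
    split
    · intro c hc; simp at hc; subst hc; exact pv_digitChar_isDigit n (by omega)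
    · rename_i hn
      intro c hc
      rcases List.mem_append.1 hc with hc | hc
      · exact ih (n / 10) (Nat.div_lt_self (by omega) (by omega)) c hc
      · simp at hc; subst hc; exact pv_digitChar_isDigit _ (Nat.mod_lt _ (by omega))

theorem pvDigs_ne_nil (n : Nat) : pvDigs n ≠ [] := by
  rw [pvDigs]; split <;> simp

theorem pv_toDigitsCore_eq (n : Nat) : ∀ (f : Nat) (acc : List Char), n < f →
    Nat.toDigitsCore 10 f n acc = pvDigs n ++ acc := by
  induction n using Nat.strong_induction_on with
  | _ n ih =>
    intro f acc hf
    obtain ⟨f', rfl⟩ : ∃ f', f = f' + 1 := ⟨f - 1, by omega⟩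
    have step : Nat.toDigitsCore 10 (f' + 1) n acc =
        if n / 10 = 0 then (n % 10).digitChar :: acc
        else Nat.toDigitsCore 10 f' (n / 10) ((n % 10).digitChar :: acc) := by
      simp [Nat.toDigitsCore]
    rw [step]
    by_cases h0 : n / 10 = 0
    · rw [if_pos h0, pvDigs, dif_pos (by omega)]
      simp [Nat.mod_eq_of_lt (show n < 10 by omega)]
    · rw [if_neg h0, ih (n / 10) (Nat.div_lt_self (by omega) (by omega)) f' _ (by omega)]
      conv_rhs => rw [pvDigs]
      rw [dif_neg (show ¬ n < 10 by omega)]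
      simp

theorem pv_toDigits_eq (n : Nat) : Nat.toDigits 10 n = pvDigs n := by
  simpa using pv_toDigitsCore_eq n (n + 1) [] (by omega)

theorem pvDigs_foldl (n : Nat) : ∀ a : Nat, (pvDigs n).foldl pvStep a = a * 10 ^ (pvDigs n).length + n := by
  induction n using Nat.strong_induction_on with
  | _ n ih =>
    intro a
    rw [pvDigs]
    split
    · rename_i h
      have hv := pv_digitChar_val n h
      simp only [List.foldl_cons, List.foldl_nil, List.length_cons, List.length_nil, pvStep]
      have h0 : '0'.toNat = 48 := rfl
      rw [h0]
      omega
    · rename_i h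
      have hd := Nat.div_lt_self (show 0 < n by omega) (show 1 < 10 by omega)
      rw [List.foldl_append, ih (n / 10) hd a]
      have h0 : '0'.toNat = 48 := rfl
      simp only [List.foldl_cons, List.foldl_nil, pvStep, h0,
        pv_digitChar_val (n % 10) (Nat.mod_lt _ (by omega)), List.length_append,
        List.length_cons, List.length_nil]
      rw [pow_succ]
      have := Nat.div_add_mod n 10
      ring_nf
      omega

theorem pv_toChars_nonneg (b : Int) (hb : 0 ≤ b) : PySem.Int.toChars b = pvDigs b.toNat := by
  rw [PySem.Int.toChars, if_neg (by omega), pv_toDigits_eq]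

theorem pv_toChars_digits (b : Int) (hb : 0 ≤ b) : ∀ c ∈ PySem.Int.toChars b, c.isDigit := by
  rw [pv_toChars_nonneg b hb]; exact pvDigs_digits _

theorem pv_toChars_ne_nil (b : Int) (hb : 0 ≤ b) : PySem.Int.toChars b ≠ [] := by
  rw [pv_toChars_nonneg b hb]; exact pvDigs_ne_nil _

theorem pv_intOf_toChars (b : Int) (hb : 0 ≤ b) : pvIntOf (PySem.Int.toChars b) = b := by
  rw [pv_toChars_nonneg b hb,
      pv_intOf_digits _ (pvDigs_ne_nil _) (pvDigs_digits _)]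
  rw [pvDigs_foldl]
  simp; omega

-- ---- valuation monotonicity ----
theorem pv_foldl_mono (xs ys : List Char) (hf : List.Forall₂ (fun c d => c.toNat ≤ d.toNat) xs ys) :
    ∀ a a' : Nat, a ≤ a' → xs.foldl pvStep a ≤ ys.foldl pvStep a' := by
  induction hf with
  | nil => intro a a' h; simpa using h
  | cons hcd _ ih =>
    intro a a' h
    simp only [List.foldl_cons]
    exact ih _ _ (by unfold pvStep; omega)

-- ---- rstrip decomposition ----
theorem pv_rstrip_decomp (c : Char) (s : List Char) :
    s = pvRstrip c s ++ List.replicate (s.length - (pvRstrip c s).length) c ∧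
    (pvRstrip c s).length ≤ s.length ∧
    (pvRstrip c s = [] ∨ (pvRstrip c s).getLast? ≠ some c) := by
  have hlen : (pvRstrip c s).length ≤ s.length := by
    simp [pvRstrip]
    simpa using List.length_dropWhile_le (fun x => x == c) s.reverse
  refine ⟨?_, hlen, ?_⟩
  · have htake : List.takeWhile (· == c) s.reverse = List.replicate (List.takeWhile (· == c) s.reverse).length c := by
      apply List.eq_replicate_of_mem
      intro b hb
      simpa using List.mem_takeWhile_imp hb
    conv_lhs => rw [← List.reverse_reverse s, ← List.takeWhile_append_dropWhile (p := (· == c)) (l := s.reverse)]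
    rw [List.reverse_append, htake]
    simp [pvRstrip, List.reverse_replicate]
    have h2 := congrArg List.length (List.takeWhile_append_dropWhile (p := (· == c)) (l := s.reverse))
    simp only [List.length_append, List.length_reverse] at h2
    have h3 : (pvRstrip c s).length = (List.dropWhile (· == c) s.reverse).length := by
      simp [pvRstrip]
    omega
  · by_cases h : pvRstrip c s = []
    · exact Or.inl h
    · refine Or.inr ?_
      intro hlast
      have hhead : (List.dropWhile (· == c) s.reverse).head? = some c := by
        have : (pvRstrip c s).getLast? = (List.dropWhile (· == c) s.reverse).head? := by
          simp [pvRstrip, List.getLast?_reverse]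
        rw [← this, hlast]
      have hne : List.dropWhile (· == c) s.reverse ≠ [] := by
        intro hh; rw [hh] at hhead; simp at hhead
      have := List.head?_dropWhile_not (p := (· == c)) (l := s.reverse)
      rw [hhead] at this
      simp at this

-- ---- the fill loop computes the rstrip closed form ----
theorem pvRstrip_append_cont (contc : Char) (a : List Char) :
    pvRstrip contc (a ++ [contc]) = pvRstrip contc a := by
  simp [pvRstrip, List.dropWhile_cons_of_pos]

theorem pvRstrip_append_ne (contc c : Char) (a : List Char) (h : c ≠ contc) :
    pvRstrip contc (a ++ [c]) = a ++ [c] := by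
  simp [pvRstrip, List.dropWhile_cons_of_neg, h]

theorem pv_fillLoop_append (contc fillc : Char) (z : List Char) :
    ∀ (idxs : List Int) (a : List Char), (∀ i ∈ idxs, 0 ≤ i ∧ i < (a.length : Int)) →
    pvFillLoop contc fillc (a ++ z) idxs = pvFillLoop contc fillc a idxs ++ z := by
  intro idxs
  induction idxs with
  | nil => intro a _; rfl
  | cons i rest ih =>
    intro a hbound
    obtain ⟨hi0, hilt⟩ := hbound i (by simp)
    have hlt : i.toNat < a.length := by omega
    have hs1 : PySem.List.slice (a ++ z) none (some i) = PySem.List.slice a none (some i) := by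
      rw [PySem.List.slice_to _ hi0, PySem.List.slice_to _ hi0,
        List.take_append_of_le_length (by omega)]
    have hs2 : PySem.List.slice (a ++ z) (some (i + 1)) none =
        PySem.List.slice a (some (i + 1)) none ++ z := by
      rw [PySem.List.slice_from _ (by omega), PySem.List.slice_from _ (by omega),
        List.drop_append_of_le_length (by omega)]
    have hg : PySem.List.pyGetD (a ++ z) i ' ' = PySem.List.pyGetD a i ' ' := by
      rw [PySem.List.pyGetD_eq_getElem _ _ hi0 (by simp; omega),
        PySem.List.pyGetD_eq_getElem _ _ hi0 (by exact_mod_cast hilt)]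
      exact List.getElem_append_left hlt
    have hlen' : (PySem.List.slice a none (some i) ++ fillc ::
        PySem.List.slice a (some (i + 1)) none).length = a.length := by
      rw [PySem.List.slice_to _ hi0, PySem.List.slice_from _ (by omega)]
      simp
      omega
    simp only [pvFillLoop, hs1, hs2, hg]
    by_cases hc : PySem.List.pyGetD a i ' ' == contc
    · rw [if_pos hc, if_pos hc]
      have hre : PySem.List.slice a none (some i) ++ fillc ::
          (PySem.List.slice a (some (i + 1)) none ++ z) =
          (PySem.List.slice a none (some i) ++ fillc ::
            PySem.List.slice a (some (i + 1)) none) ++ z := by simp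
      rw [hre]
      exact ih _ (by rw [hlen']; exact fun j hj => hbound j (by simp [hj]))
    · rw [if_neg hc, if_neg hc]; simp

theorem pv_fillLoop_closed (contc fillc : Char) (s : List Char) :
    pvFillLoop contc fillc s (PySem.List.pyRange ((s.length : Int) - 1) (-1) (-1)) =
      (if pvRstrip contc s = [] then List.replicate s.length fillc
       else (pvRstrip contc s).dropLast ++ List.replicate (s.length - (pvRstrip contc s).length + 1) fillc) := by
  induction s using List.reverseRecOn with
  | nil =>
    rw [PySem.List.pyRange_neg_one_eq_nil (by norm_num)]
    simp [pvFillLoop, pvRstrip]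
  | append_singleton a c ih =>
    have hlen : (((a ++ [c]).length : Int) - 1) = (a.length : Int) := by simp
    rw [hlen, PySem.List.pyRange_neg_one_cons (by omega)]
    have hs1 : PySem.List.slice (a ++ [c]) none (some (a.length : Int)) = a := by
      rw [PySem.List.slice_to _ (by positivity)]
      simp
    have hs2 : PySem.List.slice (a ++ [c]) (some ((a.length : Int) + 1)) none = [] := by
      rw [PySem.List.slice_from _ (by positivity)]
      have : ((a.length : Int) + 1).toNat = a.length + 1 := by omega
      rw [this]
      simp
    have hg : PySem.List.pyGetD (a ++ [c]) (a.length : Int) ' ' = c := by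
      rw [PySem.List.pyGetD_eq_getElem _ _ (by positivity) (by simp)]
      simp
    simp only [pvFillLoop, hs1, hs2, hg]
    by_cases hc : c = contc
    · rw [hc]
      rw [if_pos (by simp)]
      have hbnd : ∀ i ∈ PySem.List.pyRange ((a.length : Int) - 1) (-1) (-1),
          0 ≤ i ∧ i < (a.length : Int) := by
        intro i hi
        have := (PySem.List.mem_pyRange_neg_one).1 hi
        omega
      rw [pv_fillLoop_append contc fillc [fillc] _ a hbnd, ih, pvRstrip_append_cont]
      have hle := (pv_rstrip_decomp contc a).2.1
      by_cases ht : pvRstrip contc a = []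
      · rw [if_pos ht, if_pos ht]
        simp [List.replicate_succ']
      · rw [if_neg ht, if_neg ht]
        have : (a ++ [contc]).length - (pvRstrip contc a).length + 1 =
            (a.length - (pvRstrip contc a).length + 1) + 1 := by
          simp; omega
        rw [this, List.replicate_succ']
        simp only [List.append_assoc, List.singleton_append]
        rw [List.replicate_succ' (n := a.length - (pvRstrip contc a).length + 1),
            List.replicate_succ' (n := a.length - (pvRstrip contc a).length)]
        simp
    · rw [if_neg (by simpa using hc)]
      rw [pvRstrip_append_ne contc c a hc]
      rw [if_neg (by simp)]
      rw [List.dropLast_concat]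
      simp

theorem pv_upper_eq (b : Int) : pvGetUpperRange b = (b, pvNineFill b) := by
  unfold pvGetUpperRange pvNineFill
  simp only [PySem.List.len_eq]
  rw [pv_fillLoop_closed]

theorem pv_lower_eq (e : Int) : pvGetLowerRange e = (pvZeroFill e, e) := by
  unfold pvGetLowerRange pvZeroFill
  simp only [PySem.List.len_eq]
  rw [pv_fillLoop_closed]

-- ---- value bounds for the fills ----
theorem pv_digit_bounds (c : Char) (h : c.isDigit) : 48 ≤ c.toNat ∧ c.toNat ≤ 57 := by
  simp only [Char.isDigit, Bool.and_eq_true, decide_eq_true_eq, ge_iff_le] at h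
  obtain ⟨h1, h2⟩ := h
  rw [UInt32.le_iff_toNat_le] at h1 h2
  unfold Char.toNat
  exact ⟨h1, h2⟩

theorem pv_forall2_replicate (x y : Char) (h : x.toNat ≤ y.toNat) (n : Nat) :
    List.Forall₂ (fun c d => c.toNat ≤ d.toNat) (List.replicate n x) (List.replicate n y) := by
  induction n with
  | zero => constructor
  | succ n ih =>
    rw [List.replicate_succ, List.replicate_succ]
    exact List.Forall₂.cons h ih

theorem pv_forall2_refl (l : List Char) :
    List.Forall₂ (fun c d => c.toNat ≤ d.toNat) l l :=
  List.forall₂_same.2 (fun _ _ => le_rfl)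

theorem pv_forall2_append {r : Char → Char → Prop} {a b c d : List Char}
    (h1 : List.Forall₂ r a b) (h2 : List.Forall₂ r c d) : List.Forall₂ r (a ++ c) (b ++ d) := by
  induction h1 with
  | nil => exact h2
  | cons h _ ih => exact List.Forall₂.cons h ih

-- the fill closed form: digit chars, nonempty, and a pointwise value comparison
theorem pv_fill_core (s : List Char) (hs : s ≠ []) (hd : ∀ c ∈ s, c.isDigit)
    (sc fc : Char) (hfc : fc.isDigit) :
    (∀ c ∈ (if pvRstrip sc s = [] then List.replicate s.length fc
            else (pvRstrip sc s).dropLast ++ List.replicate (s.length - (pvRstrip sc s).length + 1) fc),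
        c.isDigit) ∧
    (if pvRstrip sc s = [] then List.replicate s.length fc
     else (pvRstrip sc s).dropLast ++ List.replicate (s.length - (pvRstrip sc s).length + 1) fc) ≠ [] ∧
    (fc = '9' → List.Forall₂ (fun c d => c.toNat ≤ d.toNat) s
      (if pvRstrip sc s = [] then List.replicate s.length fc
       else (pvRstrip sc s).dropLast ++ List.replicate (s.length - (pvRstrip sc s).length + 1) fc)) ∧
    (fc = '0' → List.Forall₂ (fun c d => c.toNat ≤ d.toNat)
      (if pvRstrip sc s = [] then List.replicate s.length fc
       else (pvRstrip sc s).dropLast ++ List.replicate (s.length - (pvRstrip sc s).length + 1) fc) s) := by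
  have h9v : ('9' : Char).toNat = 57 := rfl
  have h0v : ('0' : Char).toNat = 48 := rfl
  obtain ⟨hdecomp, hle, -⟩ := pv_rstrip_decomp sc s
  have hmem : ∀ c ∈ pvRstrip sc s, c ∈ s := by
    intro c hc; rw [hdecomp]; exact List.mem_append_left _ hc
  by_cases ht : pvRstrip sc s = []
  · rw [if_pos ht]
    have hsrep : s = List.replicate s.length sc := by
      conv_lhs => rw [hdecomp, ht]
      simp
    have hsc : sc ∈ s := by
      rw [hsrep]
      exact List.mem_replicate.2 ⟨by simpa using hs, rfl⟩
    have hscd := pv_digit_bounds sc (hd sc hsc)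
    refine ⟨?_, ?_, ?_, ?_⟩
    · intro c hc; rw [List.eq_of_mem_replicate hc]; exact hfc
    · have : s.length ≠ 0 := by simpa using hs
      simp [this]
    · intro h9
      conv_lhs => rw [hsrep]
      exact pv_forall2_replicate _ _ (by rw [h9, h9v]; omega) _
    · intro h0
      conv_rhs => rw [hsrep]
      exact pv_forall2_replicate _ _ (by rw [h0, h0v]; omega) _
  · rw [if_neg ht]
    have hlast := List.dropLast_concat_getLast ht
    have htlen : 0 < (pvRstrip sc s).length := List.length_pos_iff.2 ht
    have hk : s.length - (pvRstrip sc s).length + 1 = (s.length - (pvRstrip sc s).length) + 1 := rfl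
    have hsplit : s = (pvRstrip sc s).dropLast ++
        ((pvRstrip sc s).getLast ht :: List.replicate (s.length - (pvRstrip sc s).length) sc) := by
      conv_lhs => rw [hdecomp]
      conv_lhs => rw [← hlast]
      simp
      omega
    have hlastd := pv_digit_bounds _ (hd _ (hmem _ (List.getLast_mem ht)))
    refine ⟨?_, ?_, ?_, ?_⟩
    · intro c hc
      rcases List.mem_append.1 hc with hc | hc
      · exact hd c (hmem c (List.dropLast_subset _ hc))
      · rw [List.eq_of_mem_replicate hc]; exact hfc
    · rw [hk, List.replicate_succ]; simp
    · intro h9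
      conv_lhs => rw [hsplit]
      rw [hk, List.replicate_succ]
      refine pv_forall2_append (pv_forall2_refl _) (List.Forall₂.cons (by rw [h9, h9v]; omega) ?_)
      rcases hn : s.length - (pvRstrip sc s).length with _ | m
      · constructor
      · have hscs : sc ∈ s := by
          rw [hdecomp, hn]
          exact List.mem_append_right _ (by simp [List.replicate_succ])
        have := (pv_digit_bounds sc (hd sc hscs)).2
        exact pv_forall2_replicate _ _ (by rw [h9, h9v]; omega) _
    · intro h0
      conv_rhs => rw [hsplit]
      rw [hk, List.replicate_succ]
      refine pv_forall2_append (pv_forall2_refl _) (List.Forall₂.cons (by rw [h0, h0v]; omega) ?_)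
      rcases hn : s.length - (pvRstrip sc s).length with _ | m
      · constructor
      · have hscs : sc ∈ s := by
          rw [hdecomp, hn]
          exact List.mem_append_right _ (by simp [List.replicate_succ])
        have := (pv_digit_bounds sc (hd sc hscs)).1
        exact pv_forall2_replicate _ _ (by rw [h0, h0v]; omega) _

theorem pv_nineFill_ge (b : Int) (hb : 0 ≤ b) : b ≤ pvNineFill b := by
  have hd := pv_toChars_digits b hb
  have hne := pv_toChars_ne_nil b hb
  obtain ⟨hdig, hnen, hmono, -⟩ := pv_fill_core (PySem.Int.toChars b) hne hd '0' '9' (by decide)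
  unfold pvNineFill
  rw [pv_intOf_digits _ hnen hdig]
  conv_lhs => rw [← pv_intOf_toChars b hb]
  rw [pv_intOf_digits _ hne hd]
  exact_mod_cast pv_foldl_mono _ _ (hmono rfl) 0 0 le_rfl

theorem pv_zeroFill_bounds (e : Int) (he : 0 ≤ e) : 0 ≤ pvZeroFill e ∧ pvZeroFill e ≤ e := by
  have hd := pv_toChars_digits e he
  have hne := pv_toChars_ne_nil e he
  obtain ⟨hdig, hnen, -, hmono⟩ := pv_fill_core (PySem.Int.toChars e) hne hd '9' '0' (by decide)
  unfold pvZeroFill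
  rw [pv_intOf_digits _ hnen hdig]
  constructor
  · positivity
  · conv_rhs => rw [← pv_intOf_toChars e he]
    rw [pv_intOf_digits _ hne hd]
    exact_mod_cast pv_foldl_mono _ _ (hmono rfl) 0 0 le_rfl

-- ---- loop characterizations ----
theorem pv_leftAux_acc (f : Nat) : ∀ (b e : Int) (acc : List (Int × Int)),
    pvSplitLeftAux f b e acc = acc ++ pvSplitLeftAux f b e [] := by
  induction f with
  | zero => intro b e acc; simp [pvSplitLeftAux]
  | succ f ih =>
    intro b e acc
    by_cases hbe : b < e
    · simp only [pvSplitLeftAux, if_pos hbe]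
      rw [ih _ _ (acc ++ [pvGetUpperRange b]), ih _ _ ([] ++ [pvGetUpperRange b])]
      simp
    · simp [pvSplitLeftAux, hbe]

theorem pv_leftAux_sat (e : Int) : ∀ (n : Nat) (b : Int), (e - b).toNat ≤ n → 0 ≤ b →
    ∀ f : Nat, (e - b).toNat ≤ f → pvSplitLeftAux f b e [] = pvSplitLeftAux (e - b).toNat b e [] := by
  intro n
  induction n with
  | zero =>
    intro b hn hb f hf
    have hbe : ¬ b < e := by omega
    rw [show (e - b).toNat = 0 by omega]
    cases f <;> simp [pvSplitLeftAux, hbe]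
  | succ n ih =>
    intro b hn hb f hf
    by_cases hbe : b < e
    · obtain ⟨m, hm⟩ : ∃ m, (e - b).toNat = m + 1 := ⟨(e - b).toNat - 1, by omega⟩
      obtain ⟨f', rfl⟩ : ∃ f', f = f' + 1 := ⟨f - 1, by omega⟩
      rw [hm]
      simp only [pvSplitLeftAux, if_pos hbe]
      rw [pv_leftAux_acc f', pv_leftAux_acc m]
      have hup : (pvGetUpperRange b).2 + 1 = pvNineFill b + 1 := by rw [pv_upper_eq]
      have hprog : b < pvNineFill b + 1 := by have := pv_nineFill_ge b hb; omega
      have hb' : 0 ≤ pvNineFill b + 1 := by omega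
      have hlt : (e - (pvNineFill b + 1)).toNat ≤ n := by omega
      rw [hup, ih _ hlt hb' f' (by omega), ih _ hlt hb' m (by omega)]
    · rw [show (e - b).toNat = 0 by omega]
      cases f <;> simp [pvSplitLeftAux, hbe]

theorem pv_left_cons (b e : Int) (hb : 0 ≤ b) (hlt : b < e) :
    pvSplitRangeLeft b e = (b, pvNineFill b) :: pvSplitRangeLeft (pvNineFill b + 1) e := by
  unfold pvSplitRangeLeft
  obtain ⟨m, hm⟩ : ∃ m, (e - b).toNat = m + 1 := ⟨(e - b).toNat - 1, by omega⟩
  rw [hm]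
  simp only [pvSplitLeftAux, if_pos hlt]
  rw [pv_leftAux_acc m, pv_upper_eq]
  have hprog := pv_nineFill_ge b hb
  have h2 := pv_leftAux_sat e m (pvNineFill b + 1) (by omega) (by omega) m (by omega)
  simp only [List.nil_append]
  show (b, pvNineFill b) :: pvSplitLeftAux m (pvNineFill b + 1) e [] = _
  rw [h2]

theorem pv_left_nil (b e : Int) (h : e ≤ b) : pvSplitRangeLeft b e = [] := by
  unfold pvSplitRangeLeft
  rw [show (e - b).toNat = 0 by omega]
  rfl

theorem pv_rightAux_acc (f : Nat) : ∀ (b e : Int) (acc : List (Int × Int)),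
    pvSplitRightAux f b e acc = acc ++ pvSplitRightAux f b e [] := by
  induction f with
  | zero => intro b e acc; simp [pvSplitRightAux]
  | succ f ih =>
    intro b e acc
    by_cases hbe : b < e
    · simp only [pvSplitRightAux, if_pos hbe]
      rw [ih _ _ (acc ++ [pvGetLowerRange e]), ih _ _ ([] ++ [pvGetLowerRange e])]
      simp
    · simp [pvSplitRightAux, hbe]

theorem pv_rightAux_sat (b : Int) (hb : 0 ≤ b) : ∀ (n : Nat) (e : Int), (e - b).toNat ≤ n →
    ∀ f : Nat, (e - b).toNat ≤ f → pvSplitRightAux f b e [] = pvSplitRightAux (e - b).toNat b e [] := by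
  intro n
  induction n with
  | zero =>
    intro e hn f hf
    have hbe : ¬ b < e := by omega
    rw [show (e - b).toNat = 0 by omega]
    cases f <;> simp [pvSplitRightAux, hbe]
  | succ n ih =>
    intro e hn f hf
    by_cases hbe : b < e
    · obtain ⟨m, hm⟩ : ∃ m, (e - b).toNat = m + 1 := ⟨(e - b).toNat - 1, by omega⟩
      obtain ⟨f', rfl⟩ : ∃ f', f = f' + 1 := ⟨f - 1, by omega⟩
      rw [hm]
      simp only [pvSplitRightAux, if_pos hbe]
      rw [pv_rightAux_acc f', pv_rightAux_acc m]
      have hlow : (pvGetLowerRange e).1 - 1 = pvZeroFill e - 1 := by rw [pv_lower_eq]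
      have hzf := pv_zeroFill_bounds e (by omega)
      have hlt : (pvZeroFill e - 1 - b).toNat ≤ n := by omega
      rw [hlow, ih _ hlt f' (by omega), ih _ hlt m (by omega)]
    · rw [show (e - b).toNat = 0 by omega]
      cases f <;> simp [pvSplitRightAux, hbe]

theorem pv_right_cons (b e : Int) (hb : 0 ≤ b) (hbe : b < e) (hlt : b < pvZeroFill e - 1) :
    pvSplitRangeRight b e = pvSplitRangeRight b (pvZeroFill e - 1) ++ [(pvZeroFill e, e)] := by
  unfold pvSplitRangeRight
  obtain ⟨m, hm⟩ : ∃ m, (e - b).toNat = m + 1 := ⟨(e - b).toNat - 1, by omega⟩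
  rw [hm]
  simp only [pvSplitRightAux, if_pos hbe]
  rw [pv_rightAux_acc m, pv_lower_eq]
  have hzf := pv_zeroFill_bounds e (by omega)
  rw [pv_rightAux_sat b hb ((pvZeroFill e - 1 - b).toNat) (pvZeroFill e - 1) le_rfl m (by omega)]
  simp

theorem pv_right_single (b e : Int) (_hb : 0 ≤ b) (hlt : b < e) (h : ¬ b < pvZeroFill e - 1) :
    pvSplitRangeRight b e = [(pvZeroFill e, e)] := by
  unfold pvSplitRangeRight
  obtain ⟨m, hm⟩ : ∃ m, (e - b).toNat = m + 1 := ⟨(e - b).toNat - 1, by omega⟩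
  rw [hm]
  simp only [pvSplitRightAux, if_pos hlt]
  rw [pv_rightAux_acc m, pv_lower_eq]
  have hnil : pvSplitRightAux m b (pvZeroFill e - 1) [] = [] := by
    cases m <;> simp [pvSplitRightAux, h]
  rw [hnil]
  simp

theorem pv_render_eq (x y : Int) : pvRenderA (x, y) = pvRenderB x y := rfl

theorem pv_pop_neg1_ne {α : Type} (L : List α) (hL : L ≠ []) :
    PySem.List.pop? L (-1) = some (L.getLast hL, L.dropLast) := by
  induction L using List.reverseRecOn with
  | nil => exact absurd rfl hL
  | append_singleton ys y _ =>
    rw [PySem.List.pop?_last]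
    simp

theorem pv_right_ne_nil (b e : Int) (hb : 0 ≤ b) (hbe : b < e) :
    pvSplitRangeRight b e ≠ [] := by
  by_cases hc : b < pvZeroFill e - 1
  · rw [pv_right_cons b e hb hbe hc]; simp
  · rw [pv_right_single b e hb hbe hc]; simp

theorem pv_left_mem : ∀ (n : Nat) (b e : Int), (e - b).toNat ≤ n → 0 ≤ b →
    ∀ p ∈ pvSplitRangeLeft b e, 0 ≤ p.1 ∧ p.1 < e := by
  intro n
  induction n with
  | zero =>
    intro b e hn hb p hp
    rw [pv_left_nil b e (by omega)] at hp
    simp at hp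
  | succ n ih =>
    intro b e hn hb p hp
    by_cases hbe : b < e
    · rw [pv_left_cons b e hb hbe] at hp
      rcases List.mem_cons.1 hp with hp | hp
      · subst hp; exact ⟨hb, hbe⟩
      · have hnf := pv_nineFill_ge b hb
        exact ih (pvNineFill b + 1) e (by omega) (by omega) p hp
    · rw [pv_left_nil b e (by omega)] at hp
      simp at hp

-- A's right pass + pop(0) + overlap merge, with pending left block (b, u), equals B's _right
theorem pv_rightPhase (b u : Int) (hb : 0 ≤ b) : ∀ (n : Nat) (e : Int), (e - b).toNat ≤ n → b < e →
    ∀ f : Nat, (e - b).toNat ≤ f →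
    (match PySem.List.pop? (pvSplitRangeRight b e) 0 with
     | none => ([] : List String)
     | some (mid_right, split_by_right) =>
       ((if mid_right.1 < u ∧ b < mid_right.2 then [(b, mid_right.2)] else [(b, u), mid_right]) ++
        split_by_right).map pvRenderA) = pvRightAux f b e u := by
  intro n
  induction n with
  | zero => intro e hn hbe f hf; omega
  | succ n ih =>
    intro e hn hbe f hf
    obtain ⟨f', rfl⟩ : ∃ f', f = f' + 1 := ⟨f - 1, by omega⟩
    have hzf := pv_zeroFill_bounds e (by omega)
    by_cases hc : b < pvZeroFill e - 1
    · rw [pv_right_cons b e hb hbe hc]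
      obtain ⟨x, xs, hxs⟩ : ∃ x xs, pvSplitRangeRight b (pvZeroFill e - 1) = x :: xs := by
        rcases h : pvSplitRangeRight b (pvZeroFill e - 1) with _ | ⟨x, xs⟩
        · exact absurd h (pv_right_ne_nil b (pvZeroFill e - 1) hb (by omega))
        · exact ⟨x, xs, rfl⟩
      have hih := ih (pvZeroFill e - 1) (by omega) (by omega) f' (by omega)
      rw [hxs, PySem.List.pop?_zero_cons] at hih
      rw [hxs, show (x :: xs) ++ [(pvZeroFill e, e)] = x :: (xs ++ [(pvZeroFill e, e)]) from rfl,
        PySem.List.pop?_zero_cons]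
      simp only
      show ((if x.1 < u ∧ b < x.2 then [(b, x.2)] else [(b, u), x]) ++ (xs ++ [(pvZeroFill e, e)])).map pvRenderA =
        pvRightAux (f' + 1) b e u
      rw [show pvRightAux (f' + 1) b e u =
          if pvZeroFill e - 1 > b then pvRightAux f' b (pvZeroFill e - 1) u ++ [pvRenderB (pvZeroFill e) e]
          else if pvZeroFill e < u then [pvRenderB b e]
          else [pvRenderB b u, pvRenderB (pvZeroFill e) e] from rfl]
      rw [if_pos (by omega : pvZeroFill e - 1 > b), ← hih]
      simp only at hih ⊢
      rw [← List.append_assoc, List.map_append]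
      simp [pv_render_eq]
    · rw [pv_right_single b e hb hbe hc, PySem.List.pop?_zero_cons]
      simp only
      rw [show pvRightAux (f' + 1) b e u =
          if pvZeroFill e - 1 > b then pvRightAux f' b (pvZeroFill e - 1) u ++ [pvRenderB (pvZeroFill e) e]
          else if pvZeroFill e < u then [pvRenderB b e]
          else [pvRenderB b u, pvRenderB (pvZeroFill e) e] from rfl]
      rw [if_neg (by omega : ¬ pvZeroFill e - 1 > b)]
      by_cases hm : pvZeroFill e < u
      · rw [if_pos hm, if_pos (⟨hm, hbe⟩ : pvZeroFill e < u ∧ b < e)]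
        simp [pv_render_eq]
      · rw [if_neg hm, if_neg (by intro h; exact hm h.1)]
        simp [pv_render_eq]

theorem pv_main : ∀ (n : Nat) (b e : Int), (e - b).toNat ≤ n → 0 ≤ b → b < e →
    ∀ f : Nat, (e - b).toNat ≤ f →
    (match PySem.List.pop? (pvSplitRangeLeft b e) (-1) with
     | none => ([] : List String)
     | some (mid_left, split_by_left) =>
       match PySem.List.pop? (pvSplitRangeRight mid_left.1 e) 0 with
       | none => []
       | some (mid_right, split_by_right) =>
         ((split_by_left ++
           (if mid_right.1 < mid_left.2 ∧ mid_left.1 < mid_right.2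
            then [(mid_left.1, mid_right.2)]
            else [mid_left, mid_right])) ++
          split_by_right).map pvRenderA) = pvSplitAux f b e := by
  intro n
  induction n with
  | zero => intro b e hn hb hbe f hf; omega
  | succ n ih =>
    intro b e hn hb hbe f hf
    obtain ⟨f', rfl⟩ : ∃ f', f = f' + 1 := ⟨f - 1, by omega⟩
    have hnf := pv_nineFill_ge b hb
    rw [show pvSplitAux (f' + 1) b e =
        (if pvNineFill b + 1 < e then pvRenderB b (pvNineFill b) :: pvSplitAux f' (pvNineFill b + 1) e
         else pvRightAux (f' + 1) b e (pvNineFill b)) from rfl]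
    by_cases hu : pvNineFill b + 1 < e
    · rw [if_pos hu, pv_left_cons b e hb hbe]
      obtain ⟨x, xs, hxs⟩ : ∃ x xs, pvSplitRangeLeft (pvNineFill b + 1) e = x :: xs := by
        rcases h : pvSplitRangeLeft (pvNineFill b + 1) e with _ | ⟨x, xs⟩
        · rw [pv_left_cons (pvNineFill b + 1) e (by omega) hu] at h
          exact absurd h (by simp)
        · exact ⟨x, xs, rfl⟩
      have hih := ih (pvNineFill b + 1) e (by omega) (by omega) hu f' (by omega)
      rw [hxs] at hih ⊢
      have hxne : (x :: xs) ≠ [] := by simp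
      simp only [pv_pop_neg1_ne _ hxne] at hih
      have hgl : ((b, pvNineFill b) :: x :: xs).getLast (by simp) = (x :: xs).getLast hxne :=
        List.getLast_cons hxne
      have hdl : ((b, pvNineFill b) :: x :: xs).dropLast = (b, pvNineFill b) :: (x :: xs).dropLast :=
        List.dropLast_cons_of_ne_nil hxne
      simp only [pv_pop_neg1_ne ((b, pvNineFill b) :: x :: xs) (by simp), hgl, hdl]
      have hml := pv_left_mem (n + 1) (pvNineFill b + 1) e (by omega) (by omega)
        ((x :: xs).getLast hxne) (by rw [hxs]; exact List.getLast_mem hxne)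
      obtain ⟨hd2, tl2, hpop2⟩ : ∃ hd tl,
          PySem.List.pop? (pvSplitRangeRight ((x :: xs).getLast hxne).1 e) 0 = some (hd, tl) := by
        rcases h2 : pvSplitRangeRight ((x :: xs).getLast hxne).1 e with _ | ⟨z, zs⟩
        · exact absurd h2 (pv_right_ne_nil _ _ hml.1 hml.2)
        · exact ⟨z, zs, PySem.List.pop?_zero_cons z zs⟩
      simp only [hpop2] at hih ⊢
      rw [← hih, ← pv_render_eq]
      simp
    · rw [if_neg hu]
      have hL : pvSplitRangeLeft b e = [(b, pvNineFill b)] := by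
        rw [pv_left_cons b e hb hbe, pv_left_nil (pvNineFill b + 1) e (by omega)]
      rw [hL, show ((b, pvNineFill b) :: ([] : List (Int × Int))) = ([] ++ [(b, pvNineFill b)]) from rfl,
        PySem.List.pop?_last]
      simp only
      have hrp := pv_rightPhase b (pvNineFill b) hb (n + 1) e hn hbe (f' + 1) hf
      rw [← hrp]
      rcases hpop : PySem.List.pop? (pvSplitRangeRight b e) 0 with _ | ⟨mr, sbr⟩ <;> simp

-- ===== VERDICT (by name: the statement is the Claim_ definition above) =====
theorem range2re_spec : Claim_equal_range2re := by
  intro begin end_ hDom hPre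
  unfold Spec_range2re
  rcases hPre with rfl | ⟨hb, hlt⟩
  · unfold range2re range2re_alt
    rw [if_pos (by simp), if_pos (by simp)]
  · have hne : (begin == end_) = false := by simp; omega
    unfold range2re range2re_alt
    rw [if_neg (by simp [hne]), if_neg (by simp [hne])]
    have := pv_main ((end_ - begin).toNat) begin end_ le_rfl hb hlt ((end_ - begin).toNat + 1) (by omega)
    rw [← this]
    rcases hpop : PySem.List.pop? (pvSplitRangeLeft begin end_) (-1) with _ | ⟨ml, sbl⟩
    · rfl
    · simp only
      rcases hpop2 : PySem.List.pop? (pvSplitRangeRight ml.1 end_) 0 with _ | ⟨mr, sbr⟩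
      · rfl
      · simp only
        rw [PySem.List.foldl_append_singleton_eq_map]
        simp
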